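-- pv_equiv track=rewrite | github.com/chaitanyagaur7/DSA-in-Python | Two Pointer/Min_Consecutive_Cards_to_Pick.py | min_cards
-- ===== SOURCE A (Python) =====
-- def min_cards(arr):
--     min_len = float('inf')
--     for i in range(len(arr)):
--         visited = set()
--         for j in range(i,len(arr)):
--             if arr[j] in visited:
--                 min_len = min(min_len, j - i + 1)
--                 break
--             else:
--                 visited.add(arr[j])
--     if min_len != float('inf'):
--         return min_len
--     return -1
-- ===== SOURCE B (Python) =====
-- def min_cards(arr):
--     last = {}
--     best = None
--     for i, v in enumerate(arr):
--         if v in last: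
--             d = i - last[v] + 1
--             if best is None or d < best:
--                 best = d
--         last[v] = i
--     return -1 if best is None else best
-- ===== Notes on version B (the rewrite author's own statement) =====
-- stated objective: faster
-- what changed: Replaces A's quadratic scan (restarting a fresh 'visited' set at every start index) by a single left-to-right pass keeping a dict of each value's last-seen index and minimizing i - last[v] + 1 over equal-value pairs.
import Mathlib
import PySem

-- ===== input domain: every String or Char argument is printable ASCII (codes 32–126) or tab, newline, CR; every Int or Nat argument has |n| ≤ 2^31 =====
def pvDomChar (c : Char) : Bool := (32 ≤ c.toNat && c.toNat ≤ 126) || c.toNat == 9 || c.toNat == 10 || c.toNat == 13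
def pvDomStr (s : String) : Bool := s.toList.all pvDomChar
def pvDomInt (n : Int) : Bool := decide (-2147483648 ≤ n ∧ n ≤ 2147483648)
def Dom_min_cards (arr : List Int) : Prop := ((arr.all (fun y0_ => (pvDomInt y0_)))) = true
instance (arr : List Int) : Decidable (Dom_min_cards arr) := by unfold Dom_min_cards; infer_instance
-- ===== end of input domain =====

-- B replaces A's O(n^2) restart-a-set-per-start scan by one O(n) pass with a last-seen-index dict.

-- ===== PORT A =====
-- min(min_len, c) with min_len possibly float('inf'): none models inf
def pvOptMin (acc : Option Int) (c : Int) : Option Int :=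
  match acc with
  | none => some c
  | some x => some (min x c)

-- the inner 'for j in range(i, len(arr))' loop with its 'visited' set and break
def pvAGo (arr : List Int) (i j : Nat) (visited : PySem.Set Int) : Option Int :=
  if h : j < arr.length then
    let v := arr.getD j 0
    if PySem.Set.contains visited v then some ((j : Int) - (i : Int) + 1)
    else pvAGo arr i (j + 1) (PySem.Set.add visited v)
  else none
termination_by arr.length - j

def min_cards (arr : List Int) : Int :=
  let m := (List.range arr.length).foldl (fun acc i =>
    match pvAGo arr i i PySem.Set.empty with
    | some c => pvOptMin acc c
    | none => acc) none
  match m with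
  | some v => v
  | none => -1

-- ===== PORT B =====
def min_cards_alt (arr : List Int) : Int :=
  let st := (PySem.List.enumerate arr 0).foldl
    (fun (st : PySem.Dict Int Int × Option Int) (iv : Int × Int) =>
      let last := st.1
      let best := st.2
      let i := iv.1
      let v := iv.2
      let best' := match last.get? v with
        | some p =>
            let d := i - p + 1
            match best with
            | none => some d
            | some b => if d < b then some d else some b
        | none => best
      (last.insert v i, best'))
    (PySem.Dict.empty, none)
  match st.2 with
  | some b => b
  | none => -1

-- ===== PRECONDITION & SPEC =====
def Spec_min_cards (arr : List Int) (out : Int) : Prop := out = min_cards_alt arr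
instance (arr : List Int) (out : Int) : Decidable (Spec_min_cards arr out) := by unfold Spec_min_cards; infer_instance

-- ===== CLAIM (what is proved, stated in full; the proofs are below) =====
def Claim_equal_min_cards : Prop := ∀ (arr : List Int), Dom_min_cards arr → Spec_min_cards arr (min_cards arr)

-- ===== LEMMAS AND PROOFS =====

-- last occurrence of v among indices < k
def pvLastOcc (arr : List Int) (v : Int) : Nat → Option Nat
  | 0 => none
  | k + 1 => if arr.getD k 0 = v then some k else pvLastOcc arr v k

def pvOptFold (acc : Option Int) (l : List Int) : Option Int := l.foldl pvOptMin acc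

-- candidate lists of the two programs
def pvCandA (arr : List Int) : List Int :=
  (List.range arr.length).filterMap (fun i => pvAGo arr i i PySem.Set.empty)

def pvCandB (arr : List Int) : List Int :=
  (List.range arr.length).filterMap (fun q =>
    (pvLastOcc arr (arr.getD q 0) q).map (fun p : Nat => (q : Int) - (p : Int) + 1))

lemma pvOptFold_mem : ∀ (l : List Int) (acc : Option Int) (v : Int),
    pvOptFold acc l = some v → v ∈ l ∨ acc = some v := by
  intro l
  induction l with
  | nil => intro acc v h; right; exact h
  | cons x xs ih =>
    intro acc v h
    rcases ih (pvOptMin acc x) v h with hm | he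
    · exact Or.inl (List.mem_cons_of_mem _ hm)
    · cases acc with
      | none =>
        simp [pvOptMin] at he
        exact Or.inl (by simp [he])
      | some a =>
        simp [pvOptMin] at he
        rcases min_cases a x with ⟨h1, _⟩ | ⟨h1, _⟩
        · right; rw [← he, h1]
        · left; simp [← he, h1]

lemma pvOptFold_le : ∀ (l : List Int) (acc : Option Int) (c : Int), c ∈ l →
    ∃ v, pvOptFold acc l = some v ∧ v ≤ c := by
  intro l
  induction l with
  | nil => intro acc c h; simp at h
  | cons x xs ih =>
    intro acc c hc
    rcases List.mem_cons.mp hc with rfl | hm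
    · -- c is the head: result ≤ every later fold of an acc that is ≤ c
      have key : ∀ (xs : List Int) (a : Int), a ≤ c →
          ∃ v, pvOptFold (some a) xs = some v ∧ v ≤ c := by
        intro xs
        induction xs with
        | nil => intro a ha; exact ⟨a, rfl, ha⟩
        | cons y ys ihy =>
          intro a ha
          have : pvOptFold (some a) (y :: ys) = pvOptFold (some (min a y)) ys := rfl
          rw [this]
          exact ihy (min a y) (le_trans (min_le_left _ _) ha)
      cases acc with
      | none => exact key xs c le_rfl
      | some a =>
        have : pvOptFold (some a) (c :: xs) = pvOptFold (some (min a c)) xs := rfl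
        rw [this]
        exact key xs (min a c) (min_le_right _ _)
    · exact ih (pvOptMin acc x) c hm

-- A's foldl over range with conditional update = pvOptFold over the filterMap
lemma pvFoldA_eq (g : Nat → Option Int) : ∀ (l : List Nat) (acc : Option Int),
    l.foldl (fun acc i => match g i with | some c => pvOptMin acc c | none => acc) acc
      = pvOptFold acc (l.filterMap g) := by
  intro l
  induction l with
  | nil => intro acc; rfl
  | cons x xs ih =>
    intro acc
    cases hg : g x with
    | none => simp [List.foldl_cons, hg, List.filterMap_cons, ih]
    | some c => simp [List.foldl_cons, hg, List.filterMap_cons, ih, pvOptFold]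

lemma pvLastOcc_some (arr : List Int) (v : Int) :
    ∀ k p, pvLastOcc arr v k = some p → p < k ∧ arr.getD p 0 = v := by
  intro k
  induction k with
  | zero => intro p h; simp [pvLastOcc] at h
  | succ k ih =>
    intro p h
    simp only [pvLastOcc] at h
    by_cases hv : arr.getD k 0 = v
    · rw [if_pos hv] at h
      injection h with h
      subst h; exact ⟨Nat.lt_succ_self _, hv⟩
    · rw [if_neg hv] at h
      rcases ih p h with ⟨h1, h2⟩
      exact ⟨Nat.lt_succ_of_lt h1, h2⟩

lemma pvLastOcc_ge (arr : List Int) (v : Int) :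
    ∀ k p, p < k → arr.getD p 0 = v → ∃ p', pvLastOcc arr v k = some p' ∧ p ≤ p' := by
  intro k
  induction k with
  | zero => intro p h; omega
  | succ k ih =>
    intro p hp hv
    by_cases hk : arr.getD k 0 = v
    · exact ⟨k, by simp only [pvLastOcc]; rw [if_pos hk], by omega⟩
    · have hpk : p < k := by
        rcases Nat.lt_succ_iff_lt_or_eq.mp hp with h | rfl
        · exact h
        · exact absurd hv hk
      rcases ih p hpk hv with ⟨p', h1, h2⟩
      exact ⟨p', by simp only [pvLastOcc]; rw [if_neg hk]; exact h1, h2⟩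

-- soundness of A's inner loop: a break yields an equal pair inside [i, j)
lemma pvAGo_sound (arr : List Int) (i : Nat) :
    ∀ n j s, arr.length - j = n → i ≤ j →
    (∀ x : Int, x ∈ s → ∃ p, i ≤ p ∧ p < j ∧ arr.getD p 0 = x) →
    ∀ w, pvAGo arr i j s = some w →
    ∃ p q, i ≤ p ∧ p < q ∧ q < arr.length ∧ arr.getD p 0 = arr.getD q 0 ∧
      w = (q : Int) - (i : Int) + 1 := by
  intro n
  induction n with
  | zero =>
    intro j s hn hij hs w hw
    rw [pvAGo] at hw
    have : ¬ j < arr.length := by omega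
    rw [dif_neg this] at hw
    exact absurd hw (by simp)
  | succ n ih =>
    intro j s hn hij hs w hw
    rw [pvAGo] at hw
    by_cases hj : j < arr.length
    · rw [dif_pos hj] at hw
      by_cases hc : PySem.Set.contains s (arr.getD j 0) = true
      · rw [if_pos hc] at hw
        injection hw with hw
        rcases hs _ ((PySem.Set.contains_iff _ _).mp hc) with ⟨p, h1, h2, h3⟩
        exact ⟨p, j, h1, h2, hj, by rw [h3], hw.symm⟩
      · rw [if_neg hc] at hw
        refine ih (j + 1) _ (by omega) (by omega) ?_ w hw
        intro x hx
        rcases (PySem.Set.mem_add _ _ _).mp hx with hxs | rfl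
        · rcases hs x hxs with ⟨p, h1, h2, h3⟩
          exact ⟨p, h1, by omega, h3⟩
        · exact ⟨j, hij, by omega, rfl⟩
    · rw [dif_neg hj] at hw
      exact absurd hw (by simp)

-- completeness: a duplicate trigger by index q forces a break with value ≤ q - i + 1
lemma pvAGo_break (arr : List Int) (i : Nat) :
    ∀ n j s q, j + n = q → q < arr.length →
    (PySem.Set.contains s (arr.getD q 0) = true ∨
      ∃ p, j ≤ p ∧ p < q ∧ arr.getD p 0 = arr.getD q 0) →
    ∃ w, pvAGo arr i j s = some w ∧ w ≤ (q : Int) - (i : Int) + 1 := by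
  intro n
  induction n with
  | zero =>
    intro j s q hn hq htrig
    have hjq : j = q := by omega
    subst hjq
    rcases htrig with hc | ⟨p, h1, h2, _⟩
    · refine ⟨(j : Int) - (i : Int) + 1, ?_, le_refl _⟩
      rw [pvAGo, dif_pos hq, if_pos hc]
    · omega
  | succ n ih =>
    intro j s q hn hq htrig
    have hj : j < arr.length := by omega
    by_cases hc : PySem.Set.contains s (arr.getD j 0) = true
    · refine ⟨(j : Int) - (i : Int) + 1, ?_, ?_⟩
      · rw [pvAGo, dif_pos hj, if_pos hc]
      · have : (j : Int) ≤ (q : Int) := by exact_mod_cast (by omega : j ≤ q)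
        omega
    · have hstep : pvAGo arr i j s
          = pvAGo arr i (j + 1) (PySem.Set.add s (arr.getD j 0)) := by
        rw [pvAGo, dif_pos hj, if_neg hc]
      rw [hstep]
      refine ih (j + 1) _ q (by omega) hq ?_
      rcases htrig with hcs | ⟨p, h1, h2, h3⟩
      · left
        apply (PySem.Set.contains_iff _ _).mpr
        exact (PySem.Set.mem_add _ _ _).mpr (Or.inl ((PySem.Set.contains_iff _ _).mp hcs))
      · by_cases hpj : p = j
        · left
          apply (PySem.Set.contains_iff _ _).mpr
          apply (PySem.Set.mem_add _ _ _).mpr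
          right
          rw [← h3, hpj]
        · exact Or.inr ⟨p, by omega, h2, h3⟩

-- B's loop = pvOptFold over the last-occurrence candidates, by the dict invariant
lemma pvBLoop (arr : List Int) :
    ∀ (l : List Int) (k : Nat) (last : PySem.Dict Int Int) (best : Option Int),
    arr.drop k = l →
    (∀ v : Int, last.get? v = (pvLastOcc arr v k).map (fun p : Nat => (p : Int))) →
    ((PySem.List.enumerate l (k : Int)).foldl
      (fun (st : PySem.Dict Int Int × Option Int) (iv : Int × Int) =>
        let last := st.1
        let best := st.2
        let i := iv.1
        let v := iv.2
        let best' := match last.get? v with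
          | some p =>
              let d := i - p + 1
              match best with
              | none => some d
              | some b => if d < b then some d else some b
          | none => best
        (last.insert v i, best')) (last, best)).2
      = pvOptFold best ((List.range' k l.length).filterMap (fun q =>
          (pvLastOcc arr (arr.getD q 0) q).map (fun p : Nat => (q : Int) - (p : Int) + 1))) := by
  intro l
  induction l with
  | nil => intro k last best _ _; simp [PySem.List.enumerate_nil, pvOptFold]
  | cons x xs ih =>
    intro k last best hdrop hinv
    have hk : k < arr.length := by
      by_contra h
      push_neg at h
      rw [List.drop_eq_nil_of_le h] at hdrop
      exact List.cons_ne_nil x xs hdrop.symm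
    have hget : arr.getD k 0 = x := by
      have h1 : (arr.drop k)[0]? = some x := by rw [hdrop]; rfl
      rw [List.getElem?_drop] at h1
      simp only [Nat.add_zero] at h1
      simp [List.getD_eq_getElem?_getD, h1]
    have hdrop' : arr.drop (k + 1) = xs := by
      have : arr.drop (k + 1) = (arr.drop k).drop 1 := by
        rw [List.drop_drop]
      rw [this, hdrop]
      rfl
    rw [PySem.List.enumerate_cons, List.foldl_cons]
    have hinv' : ∀ v : Int,
        (last.insert x (k : Int)).get? v
          = (pvLastOcc arr v (k + 1)).map (fun p => ((p : Nat) : Int)) := by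
      intro v
      rw [PySem.Dict.get?_insert]
      simp only [pvLastOcc]
      by_cases hv : v = x
      · subst hv
        rw [if_pos rfl, if_pos hget]
        rfl
      · rw [if_neg hv, if_neg (by rw [hget]; exact fun h => hv h.symm), hinv v]
    have hrange : List.range' k (xs.length + 1)
        = k :: List.range' (k + 1) xs.length := by rw [List.range'_succ]
    rw [List.length_cons, hrange, List.filterMap_cons]
    cases hlo : pvLastOcc arr (arr.getD k 0) k with
    | none =>
      have hnone : last.get? x = none := by rw [hinv x, ← hget, hlo]; rfl
      simp only [hnone, hget, hlo]
      have := ih (k + 1) (last.insert x (k : Int)) best hdrop' hinv'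
      simpa [Int.natCast_add] using this
    | some p =>
      have hsome : last.get? x = some ((p : Nat) : Int) := by
        rw [hinv x, ← hget, hlo]; rfl
      simp only [hsome, hget, hlo, Option.map_some]
      have hmin : (match best with
          | none => some ((k : Int) - (p : Int) + 1)
          | some b => if (k : Int) - (p : Int) + 1 < b
              then some ((k : Int) - (p : Int) + 1) else some b)
          = pvOptMin best ((k : Int) - (p : Int) + 1) := by
        cases best with
        | none => rfl
        | some b =>
          simp only [pvOptMin]
          by_cases hd : (k : Int) - (p : Int) + 1 < b
          · simp [hd, min_eq_right (le_of_lt hd)]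
          · simp [hd, min_eq_left (by omega : b ≤ (k : Int) - (p : Int) + 1)]
      have := ih (k + 1) (last.insert x (k : Int))
          (pvOptMin best ((k : Int) - (p : Int) + 1)) hdrop' hinv'
      rw [hmin]
      simpa [pvOptFold, Int.natCast_add] using this

-- the "min over all equal pairs" characterization
def pvPairMin (arr : List Int) (m : Option Int) : Prop :=
  (∀ p q : Nat, p < q → q < arr.length → arr.getD p 0 = arr.getD q 0 →
    ∃ v, m = some v ∧ v ≤ (q : Int) - (p : Int) + 1) ∧
  (∀ v, m = some v → ∃ p q : Nat, p < q ∧ q < arr.length ∧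
    arr.getD p 0 = arr.getD q 0 ∧ v = (q : Int) - (p : Int) + 1)

lemma pvPairMin_unique (arr : List Int) (m1 m2 : Option Int)
    (h1 : pvPairMin arr m1) (h2 : pvPairMin arr m2) : m1 = m2 := by
  rcases h1 with ⟨h1le, h1mem⟩
  rcases h2 with ⟨h2le, h2mem⟩
  cases hm1 : m1 with
  | none =>
    cases hm2 : m2 with
    | none => rfl
    | some v2 =>
      rcases h2mem v2 hm2 with ⟨p, q, hpq, hq, he, _⟩
      rcases h1le p q hpq hq he with ⟨v1, hv1, _⟩
      rw [hm1] at hv1; exact absurd hv1 (by simp)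
  | some v1 =>
    rcases h1mem v1 hm1 with ⟨p, q, hpq, hq, he, hv1⟩
    rcases h2le p q hpq hq he with ⟨v2, hv2, hle2⟩
    rcases h2mem v2 hv2 with ⟨p', q', hpq', hq', he', hv2'⟩
    rcases h1le p' q' hpq' hq' he' with ⟨v1', hv1', hle1⟩
    rw [hm1] at hv1'
    have : v1 = v1' := by injection hv1'
    subst this
    rw [hv2]
    congr 1
    omega

lemma pvPairMin_A (arr : List Int) : pvPairMin arr (pvOptFold none (pvCandA arr)) := by
  constructor
  · intro p q hpq hq he
    rcases pvAGo_break arr p (q - p) p PySem.Set.empty q (by omega) hq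
        (Or.inr ⟨p, le_refl _, hpq, he⟩) with ⟨w, hw, hwle⟩
    have hmem : w ∈ pvCandA arr := by
      apply List.mem_filterMap.mpr
      exact ⟨p, List.mem_range.mpr (by omega), hw⟩
    rcases pvOptFold_le _ none w hmem with ⟨v, hv, hvle⟩
    exact ⟨v, hv, le_trans hvle hwle⟩
  · intro v hv
    rcases pvOptFold_mem _ none v hv with hmem | habs
    swap
    · exact absurd habs (by simp)
    rcases List.mem_filterMap.mp hmem with ⟨i, _, hgo⟩
    rcases pvAGo_sound arr i (arr.length - i) i PySem.Set.empty rfl (le_refl i)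
        (by intro x hx; simp [PySem.Set.empty] at hx) v hgo with
      ⟨p, q, hip, hpq, hq, he, hveq⟩
    -- v is the overall min, and starting at p yields a candidate ≤ q - p + 1 ≤ v
    rcases pvAGo_break arr p (q - p) p PySem.Set.empty q (by omega) hq
        (Or.inr ⟨p, le_refl _, hpq, he⟩) with ⟨w, hw, hwle⟩
    have hmemw : w ∈ pvCandA arr := by
      apply List.mem_filterMap.mpr
      exact ⟨p, List.mem_range.mpr (by omega), hw⟩
    rcases pvOptFold_le _ none w hmemw with ⟨v', hv', hvle⟩
    rw [hv] at hv'
    have hvv : v = v' := by injection hv'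
    subst hvv
    have hip' : (i : Int) ≤ (p : Int) := by exact_mod_cast hip
    refine ⟨p, q, hpq, hq, he, ?_⟩
    omega

lemma pvPairMin_B (arr : List Int) : pvPairMin arr (pvOptFold none (pvCandB arr)) := by
  constructor
  · intro p q hpq hq he
    rcases pvLastOcc_ge arr (arr.getD q 0) q p hpq he with ⟨p', hlo, hpp⟩
    have hmem : (q : Int) - (p' : Int) + 1 ∈ pvCandB arr := by
      apply List.mem_filterMap.mpr
      exact ⟨q, List.mem_range.mpr hq, by rw [hlo]; rfl⟩
    rcases pvOptFold_le _ none _ hmem with ⟨v, hv, hvle⟩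
    refine ⟨v, hv, le_trans hvle ?_⟩
    have : (p : Int) ≤ (p' : Int) := by exact_mod_cast hpp
    omega
  · intro v hv
    rcases pvOptFold_mem _ none v hv with hmem | habs
    swap
    · exact absurd habs (by simp)
    rcases List.mem_filterMap.mp hmem with ⟨q, hqr, hq⟩
    cases hlo : pvLastOcc arr (arr.getD q 0) q with
    | none => rw [hlo] at hq; simp at hq
    | some p =>
      rw [hlo] at hq
      simp only [Option.map_some, Option.some_inj] at hq
      rcases pvLastOcc_some arr (arr.getD q 0) q p hlo with ⟨hpq, he⟩
      exact ⟨p, q, hpq, List.mem_range.mp hqr, he, hq.symm⟩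

-- ===== VERDICT (by name: the statement is the Claim_ definition above) =====
theorem min_cards_spec : Claim_equal_min_cards := by
  intro arr _
  unfold Spec_min_cards min_cards min_cards_alt
  have hB := pvBLoop arr arr 0 PySem.Dict.empty none rfl
    (by intro v; simp [pvLastOcc, PySem.Dict.get?_empty])
  rw [show List.range' 0 arr.length = List.range arr.length from
    List.range_eq_range'.symm] at hB
  simp only [Nat.cast_zero] at hB
  dsimp only
  rw [hB, pvFoldA_eq]
  have hAB := pvPairMin_unique arr _ _ (pvPairMin_A arr) (pvPairMin_B arr)
  simp only [pvCandA, pvCandB] at hAB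
  rw [hAB]
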